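-- pv_equiv track=rewrite | github.com/DavidFilipiak/3D-Shape-Retrieval-System | src/utils.py | count_triangles_and_quads
-- ===== SOURCE A (Python) =====
-- def count_triangles_and_quads(polygonal_face_list):
--     num_triangles = 0
--     num_quads = 0
--
--     for face in polygonal_face_list:
--         num_vertices = len(face)
--         if num_vertices == 3:
--             num_triangles += 1
--         elif num_vertices == 4:
--             num_quads += 1
--     return num_triangles, num_quads
-- ===== SOURCE B (Python) =====
-- def count_triangles_and_quads(polygonal_face_list):
--     # Divide and conquer over index ranges: counts for a range are the
--     # sums of the counts of its two halves; a singleton range is judged directly.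
--     def go(lo, hi):
--         if hi - lo == 0:
--             return (0, 0)
--         if hi - lo == 1:
--             n = len(polygonal_face_list[lo])
--             return (1 if n == 3 else 0, 1 if n == 4 else 0)
--         mid = (lo + hi) // 2
--         t1, q1 = go(lo, mid)
--         t2, q2 = go(mid, hi)
--         return (t1 + t2, q1 + q2)
--     return go(0, len(polygonal_face_list))
-- ===== Notes on version B (the rewrite author's own statement) =====
-- stated objective: alternative
-- what changed: B counts by divide and conquer: it recursively splits the index range in half and sums the (triangles, quads) pairs of the halves, instead of A's single linear loop with two scalar accumulators and if/elif branching.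
import Mathlib
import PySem

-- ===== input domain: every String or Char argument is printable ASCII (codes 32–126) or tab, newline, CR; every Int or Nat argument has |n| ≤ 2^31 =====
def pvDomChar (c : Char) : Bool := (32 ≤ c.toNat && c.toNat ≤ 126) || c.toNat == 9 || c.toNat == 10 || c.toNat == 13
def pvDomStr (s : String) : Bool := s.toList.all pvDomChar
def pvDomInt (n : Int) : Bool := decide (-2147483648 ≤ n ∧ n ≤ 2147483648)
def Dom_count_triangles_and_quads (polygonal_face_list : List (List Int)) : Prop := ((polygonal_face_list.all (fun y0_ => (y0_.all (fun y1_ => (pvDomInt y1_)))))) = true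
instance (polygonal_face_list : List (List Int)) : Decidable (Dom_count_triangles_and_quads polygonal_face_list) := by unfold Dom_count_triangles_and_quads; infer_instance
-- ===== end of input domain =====

-- B counts by divide and conquer on index ranges (summing the halves' pairs) instead of A's
-- linear accumulator loop with if/elif; an alternative decomposition of the same O(n) task.

-- ===== PORT A =====
def count_triangles_and_quads (polygonal_face_list : List (List Int)) : Int × Int :=
  let st := polygonal_face_list.foldl
    (fun (acc : Int × Int) face =>
      let num_vertices : Int := (face.length : Int)
      if num_vertices == 3 then (acc.1 + 1, acc.2)
      else if num_vertices == 4 then (acc.1, acc.2 + 1)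
      else acc)
    (0, 0)
  (st.1, st.2)

-- ===== PORT B =====
-- go(lo, hi) in Source B; indices are always in range in B, so the [lo] access is ported
-- with getD (exact wherever B reaches it).
def ctqGo (faces : List (List Int)) (lo hi : Nat) : Int × Int :=
  if hi - lo = 0 then (0, 0)
  else if hi - lo = 1 then
    let n := (faces.getD lo []).length
    ((if n = 3 then 1 else 0), (if n = 4 then 1 else 0))
  else
    let mid := (lo + hi) / 2
    let p1 := ctqGo faces lo mid
    let p2 := ctqGo faces mid hi
    (p1.1 + p2.1, p1.2 + p2.2)
termination_by hi - lo
decreasing_by all_goals omega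

def count_triangles_and_quads_alt (polygonal_face_list : List (List Int)) : Int × Int :=
  ctqGo polygonal_face_list 0 polygonal_face_list.length

-- ===== PRECONDITION & SPEC =====
def Spec_count_triangles_and_quads (polygonal_face_list : List (List Int)) (out : Int × Int) : Prop := out = count_triangles_and_quads_alt polygonal_face_list
instance (polygonal_face_list : List (List Int)) (out : Int × Int) : Decidable (Spec_count_triangles_and_quads polygonal_face_list out) := by unfold Spec_count_triangles_and_quads; infer_instance

-- ===== CLAIM (what is proved, stated in full; the proofs are below) =====
def Claim_equal_count_triangles_and_quads : Prop := ∀ (polygonal_face_list : List (List Int)), Dom_count_triangles_and_quads polygonal_face_list → Spec_count_triangles_and_quads polygonal_face_list (count_triangles_and_quads polygonal_face_list)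

-- ===== LEMMAS AND PROOFS =====

-- the counts of a list of faces, as a pair
def ctqCount (l : List (List Int)) : Int × Int :=
  (((l.map (fun face => (face.length : Int))).count 3 : Int),
   ((l.map (fun face => (face.length : Int))).count 4 : Int))

theorem ctqCount_append (l₁ l₂ : List (List Int)) :
    ctqCount (l₁ ++ l₂) = ((ctqCount l₁).1 + (ctqCount l₂).1, (ctqCount l₁).2 + (ctqCount l₂).2) := by
  simp [ctqCount, List.count_append]

-- A's fold, started at any state, adds the counts.
theorem ctq_fold_counts (l : List (List Int)) (t q : Int) :
    l.foldl
      (fun (acc : Int × Int) face =>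
        let num_vertices : Int := (face.length : Int)
        if num_vertices == 3 then (acc.1 + 1, acc.2)
        else if num_vertices == 4 then (acc.1, acc.2 + 1)
        else acc)
      (t, q)
    = (t + (ctqCount l).1, q + (ctqCount l).2) := by
  induction l generalizing t q with
  | nil => simp [ctqCount]
  | cons f rest ih =>
    rw [List.foldl_cons]
    by_cases h3 : ((f.length : Int) == 3) = true
    · rw [if_pos h3, ih]
      have h3' : (f.length : Int) = 3 := by simpa using h3
      simp only [ctqCount, List.map_cons, List.count_cons, h3', Prod.mk.injEq]
      constructor <;> · push_cast; simp; try ring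
    · rw [if_neg h3]
      by_cases h4 : ((f.length : Int) == 4) = true
      · rw [if_pos h4, ih]
        have h4' : (f.length : Int) = 4 := by simpa using h4
        simp only [ctqCount, List.map_cons, List.count_cons, h4', Prod.mk.injEq]
        constructor <;> · push_cast; simp; try ring
      · rw [if_neg h4, ih]
        have h3' : ¬ (f.length : Int) = 3 := by simpa using h3
        have h4' : ¬ (f.length : Int) = 4 := by simpa using h4
        simp [ctqCount, h3', h4']

-- B's divide and conquer computes the counts of the slice [lo, hi).
theorem ctqGo_counts (faces : List (List Int)) :
    ∀ k lo hi, hi - lo = k → lo ≤ hi → hi ≤ faces.length →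
      ctqGo faces lo hi = ctqCount ((faces.drop lo).take (hi - lo)) := by
  intro k
  induction k using Nat.strong_induction_on with
  | _ k ih =>
    intro lo hi hk hle hlen
    rw [ctqGo]
    by_cases h0 : hi - lo = 0
    · simp [h0, ctqCount]
    · rw [if_neg h0]
      by_cases h1 : hi - lo = 1
      · rw [if_pos h1]
        have hlo : lo < faces.length := by omega
        have hdrop : faces.drop lo = faces[lo] :: faces.drop (lo + 1) :=
          List.drop_eq_getElem_cons hlo
        have hgetD : faces.getD lo [] = faces[lo] := List.getD_eq_getElem faces [] hlo
        rw [h1, hdrop]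
        simp only [List.take_succ_cons, List.take_zero, ctqCount, List.map_cons, List.map_nil,
          hgetD]
        by_cases e3 : faces[lo].length = 3
        · simp [e3]
        · by_cases e4 : faces[lo].length = 4
          · have : ¬ ((faces[lo].length : Int) = 3) := by omega
            simp [e4]
          · have n3 : ¬ ((faces[lo].length : Int) = 3) := by omega
            have n4 : ¬ ((faces[lo].length : Int) = 4) := by omega
            simp [e3, e4, n3, n4]
      · rw [if_neg h1]
        have h2 : 2 ≤ hi - lo := by omega
        have hmid1 : lo < (lo + hi) / 2 := by omega
        have hmid2 : (lo + hi) / 2 < hi := by omega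
        dsimp only
        rw [ih ((lo + hi) / 2 - lo) (by omega) lo ((lo + hi) / 2) rfl (by omega) (by omega),
            ih (hi - (lo + hi) / 2) (by omega) ((lo + hi) / 2) hi rfl (by omega) hlen]
        have hsplit : (faces.drop lo).take (hi - lo)
            = (faces.drop lo).take ((lo + hi) / 2 - lo)
              ++ (faces.drop ((lo + hi) / 2)).take (hi - (lo + hi) / 2) := by
          have h' : hi - lo = ((lo + hi) / 2 - lo) + (hi - (lo + hi) / 2) := by omega
          have e : lo + ((lo + hi) / 2 - lo) = (lo + hi) / 2 := by omega
          rw [h', List.take_add, List.drop_drop, e]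
        rw [hsplit, ctqCount_append]

-- ===== VERDICT (by name: the statement is the Claim_ definition above) =====
theorem count_triangles_and_quads_spec : Claim_equal_count_triangles_and_quads := by
  intro l _
  show count_triangles_and_quads l = count_triangles_and_quads_alt l
  unfold count_triangles_and_quads count_triangles_and_quads_alt
  rw [ctq_fold_counts, ctqGo_counts l (l.length - 0) 0 l.length rfl (Nat.zero_le _) le_rfl]
  simp
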